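-- pv_equiv track=rewrite | github.com/LucasQuiles/sdlc-os | skills/deduplicating-functions/scripts/detect-pdg-semantic.py | segment_into_blocks
-- ===== SOURCE A (Python) =====
-- STATEMENT_BOUNDARIES: frozenset[str] = frozenset({
--     "FunctionDef",
--     "AsyncFunctionDef",
--     "If",
--     "For",
--     "While",
--     "Try",
--     "With",
--     "Return",
--     "Assign",
--     "AugAssign",
--     "Expr",
--     "Raise",
--     "Assert",
--     "Delete",
--     "Import",
--     "ClassDef",
-- })
--
-- def segment_into_blocks(token_sequence: list[str]) -> list[list[str]]:
--     """Segment a flat token_sequence into statement blocks.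
--
--     A new block starts whenever a STATEMENT_BOUNDARIES token is encountered.
--     The boundary token becomes the first token of the new block.
--
--     Returns a list of non-empty blocks.  An empty token_sequence produces [].
--     """
--     if not token_sequence:
--         return []
--
--     blocks: list[list[str]] = []
--     current: list[str] = []
--
--     for tok in token_sequence:
--         if tok in STATEMENT_BOUNDARIES:
--             if current:
--                 blocks.append(current)
--             current = [tok]
--         else:
--             current.append(tok)
--
--     if current:
--         blocks.append(current)
--
--     return blocks
-- ===== SOURCE B (Python) =====
-- STATEMENT_BOUNDARIES: frozenset = frozenset({
--     "FunctionDef",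
--     "AsyncFunctionDef",
--     "If",
--     "For",
--     "While",
--     "Try",
--     "With",
--     "Return",
--     "Assign",
--     "AugAssign",
--     "Expr",
--     "Raise",
--     "Assert",
--     "Delete",
--     "Import",
--     "ClassDef",
-- })
--
--
-- def _span(toks):
--     """Split toks into its leading run of non-boundary tokens and the rest."""
--     k = 0
--     while k < len(toks) and toks[k] not in STATEMENT_BOUNDARIES:
--         k += 1
--     return toks[:k], toks[k:]
--
--
-- def segment_into_blocks(token_sequence: list) -> list:
--     """Segment by repeatedly splitting off the next statement span."""
--     head, rest = _span(token_sequence)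
--     blocks = [head] if head else []
--     while rest:
--         lead = rest[0]
--         blk, rest = _span(rest[1:])
--         blocks.append([lead] + blk)
--     return blocks
-- ===== Notes on version B (the rewrite author's own statement) =====
-- stated objective: alternative
-- what changed: Replaces A's single accumulating loop (flush current block at each boundary, trailing flush) with repeated span extraction: split off the leading non-boundary run, then peel one boundary-led span per outer iteration.
import Mathlib
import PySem

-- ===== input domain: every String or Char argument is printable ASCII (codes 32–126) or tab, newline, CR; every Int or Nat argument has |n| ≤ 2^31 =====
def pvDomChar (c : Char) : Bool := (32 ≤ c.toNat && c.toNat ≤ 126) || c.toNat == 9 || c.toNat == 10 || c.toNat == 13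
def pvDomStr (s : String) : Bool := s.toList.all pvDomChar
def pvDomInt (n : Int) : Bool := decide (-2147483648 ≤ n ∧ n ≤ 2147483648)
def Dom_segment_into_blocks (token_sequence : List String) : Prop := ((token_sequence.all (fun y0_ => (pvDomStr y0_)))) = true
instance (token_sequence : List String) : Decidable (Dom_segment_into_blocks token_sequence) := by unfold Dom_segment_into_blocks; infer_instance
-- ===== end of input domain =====

-- B restructures A's single accumulating loop into repeated span extraction (alternative decomposition, same cost class).

-- ===== PORT A =====
-- the STATEMENT_BOUNDARIES frozenset; membership tested as list membership (exact for these literals)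
def pvBoundaries : List String :=
  ["FunctionDef", "AsyncFunctionDef", "If", "For", "While", "Try", "With",
   "Return", "Assign", "AugAssign", "Expr", "Raise", "Assert", "Delete",
   "Import", "ClassDef"]

-- the body of A's for-loop: state = (blocks, current)
def pvStep (st : List (List String) × List String) (tok : String) :
    List (List String) × List String :=
  if tok ∈ pvBoundaries then
    ((if st.2 ≠ [] then st.1 ++ [st.2] else st.1), [tok])
  else
    (st.1, st.2 ++ [tok])

def segment_into_blocks (token_sequence : List String) : List (List String) :=
  if token_sequence = [] then []
  else
    let st := token_sequence.foldl pvStep ([], [])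
    if st.2 ≠ [] then st.1 ++ [st.2] else st.1

-- ===== PORT B =====
-- _span's while loop: length of the leading run of non-boundary tokens
def pvSpanLen : List String → Nat
  | [] => 0
  | t :: ts => if t ∈ pvBoundaries then 0 else pvSpanLen ts + 1

-- _span: (toks[:k], toks[k:])
def pvSpan (toks : List String) : List String × List String :=
  (toks.take (pvSpanLen toks), toks.drop (pvSpanLen toks))

-- the outer while loop of B: peel one boundary-led span per iteration
def pvAltLoop : List String → List (List String)
  | [] => []
  | lead :: rest' =>
    let p := pvSpan rest'
    (lead :: p.1) :: pvAltLoop p.2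
termination_by rest => rest.length
decreasing_by simp only [pvSpan, List.length_drop, List.length_cons]; omega

def segment_into_blocks_alt (token_sequence : List String) : List (List String) :=
  let p := pvSpan token_sequence
  (if p.1 ≠ [] then [p.1] else []) ++ pvAltLoop p.2

-- ===== PRECONDITION & SPEC =====
def Spec_segment_into_blocks (token_sequence : List String) (out : List (List String)) : Prop := out = segment_into_blocks_alt token_sequence
instance (token_sequence : List String) (out : List (List String)) : Decidable (Spec_segment_into_blocks token_sequence out) := by unfold Spec_segment_into_blocks; infer_instance

-- ===== CLAIM (what is proved, stated in full; the proofs are below) =====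
def Claim_equal_segment_into_blocks : Prop := ∀ (token_sequence : List String), Dom_segment_into_blocks token_sequence → Spec_segment_into_blocks token_sequence (segment_into_blocks token_sequence)

-- ===== LEMMAS AND PROOFS =====

-- recursive characterisation of A's loop: blocks produced from a pending current block
def pvAux (cur : List String) : List String → List (List String)
  | [] => if cur ≠ [] then [cur] else []
  | t :: ts =>
    if t ∈ pvBoundaries then
      (if cur ≠ [] then cur :: pvAux [t] ts else pvAux [t] ts)
    else pvAux (cur ++ [t]) ts

lemma pvAltLoop_nil : pvAltLoop [] = [] := by
  conv_lhs => unfold pvAltLoop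

lemma pvAltLoop_cons (lead : String) (rest' : List String) :
    pvAltLoop (lead :: rest') = (lead :: (pvSpan rest').1) :: pvAltLoop (pvSpan rest').2 := by
  conv_lhs => unfold pvAltLoop

lemma pvFoldA (ts : List String) : ∀ bs cur,
    (let st := ts.foldl pvStep (bs, cur);
     if st.2 ≠ [] then st.1 ++ [st.2] else st.1) = bs ++ pvAux cur ts := by
  induction ts with
  | nil =>
    intro bs cur
    simp only [List.foldl_nil, pvAux]
    split_ifs <;> simp
  | cons t ts ih =>
    intro bs cur
    simp only [List.foldl_cons, pvStep, pvAux]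
    by_cases hb : t ∈ pvBoundaries
    · simp only [hb, if_pos]
      by_cases hc : cur ≠ []
      · simpa [hc, List.append_assoc] using ih (bs ++ [cur]) [t]
      · simpa [hc] using ih bs [t]
    · simpa [hb] using ih bs (cur ++ [t])

lemma pvAuxSpan (ts : List String) : ∀ cur,
    pvAux cur ts =
      (if cur ++ (pvSpan ts).1 ≠ [] then (cur ++ (pvSpan ts).1) :: pvAltLoop (pvSpan ts).2
       else pvAltLoop (pvSpan ts).2) := by
  induction ts with
  | nil =>
    intro cur
    simp [pvAux, pvSpan, pvSpanLen, pvAltLoop_nil]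
  | cons t ts ih =>
    intro cur
    by_cases hb : t ∈ pvBoundaries
    · have hspan : pvSpan (t :: ts) = ([], t :: ts) := by
        simp [pvSpan, pvSpanLen, hb]
      rw [hspan]
      simp only [pvAux, hb, if_pos, List.append_nil, pvAltLoop_cons]
      by_cases hc : cur ≠ []
      · simp only [ih [t]]
        simp
      · simp only [hc]
        simp only [not_not] at hc
        subst hc
        simpa using ih [t]
    · have hspan : pvSpan (t :: ts) = (t :: (pvSpan ts).1, (pvSpan ts).2) := by
        simp [pvSpan, pvSpanLen, hb]
      rw [hspan]
      simp only [pvAux, hb, if_neg, not_false_iff]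
      rw [ih (cur ++ [t])]
      simp

-- ===== VERDICT (by name: the statement is the Claim_ definition above) =====
theorem segment_into_blocks_spec : Claim_equal_segment_into_blocks := by
  unfold Claim_equal_segment_into_blocks
  intro ts _
  unfold Spec_segment_into_blocks segment_into_blocks segment_into_blocks_alt
  by_cases h : ts = []
  · subst h; simp [pvSpan, pvSpanLen, pvAltLoop_nil]
  · simp only [h, if_neg, not_false_iff]
    have := pvFoldA ts [] []
    simp only [List.nil_append] at this
    rw [this, pvAuxSpan ts []]
    simp only [List.nil_append]
    split_ifs <;> simp
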